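-- pv_equiv track=rewrite | github.com/mohanganesh3/ship | training/phase2_optionc_common.py | synthesize_reasoning
-- ===== SOURCE A (Python) =====
-- def normalize_space(text: str | None) -> str:
--     return " ".join(str(text or "").split()).strip()
--
-- def coalesce_question(record: dict) -> str:
--     return normalize_space(record.get("q") or record.get("question") or record.get("prompt"))
--
-- def synthesize_reasoning(record: dict, answer_text: str) -> str:
--     domain = normalize_space(record.get("domain_letter") or record.get("domain_name") or "shipboard")
--     sample_type = normalize_space(record.get("sample_type") or record.get("type") or "maritime")
--     q = coalesce_question(record)
--     steps = []
--     answer_lines = [normalize_space(line) for line in str(answer_text).splitlines() if normalize_space(line)]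
--     for idx, line in enumerate(answer_lines[:3], start=1):
--         steps.append(f"{idx}. Operational check: {line}")
--     while len(steps) < 3:
--         steps.append(
--             f"{len(steps) + 1}. Operational check: verify the governing onboard limits, alarms, and authority chain before continuing."
--         )
--     return "\n".join(
--         [
--             f"1. Context: {sample_type} case in domain {domain}.",
--             f"2. Question focus: {q or 'maritime safety decision'}.",
--             f"3. Safety logic: isolate the immediate risk, confirm the critical inputs, then apply the governing procedure.",
--             f"4. Evidence: {steps[0].split(':', 1)[1].strip()}",
--         ]
--     )
-- ===== SOURCE B (Python) =====
-- def normalize_space(text):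
--     return " ".join(str(text or "").split()).strip()
--
--
-- DEFAULT_CHECK = "verify the governing onboard limits, alarms, and authority chain before continuing."
--
--
-- def _first_truthy(record, keys, default):
--     for k in keys:
--         v = record.get(k)
--         if v:
--             return normalize_space(v)
--     return normalize_space(default)
--
--
-- def _first_nonblank_line(text):
--     for line in str(text).splitlines():
--         s = normalize_space(line)
--         if s:
--             return s
--     return DEFAULT_CHECK
--
--
-- def synthesize_reasoning(record, answer_text):
--     domain = _first_truthy(record, ("domain_letter", "domain_name"), "shipboard")
--     sample_type = _first_truthy(record, ("sample_type", "type"), "maritime")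
--     q = _first_truthy(record, ("q", "question", "prompt"), "")
--     return (
--         "1. Context: " + sample_type + " case in domain " + domain + ".\n"
--         "2. Question focus: " + (q or "maritime safety decision") + ".\n"
--         "3. Safety logic: isolate the immediate risk, confirm the critical inputs, then apply the governing procedure.\n"
--         "4. Evidence: " + _first_nonblank_line(answer_text)
--     )
-- ===== Notes on version B (the rewrite author's own statement) =====
-- stated objective: simpler
-- what changed: B replaces A's or-chain field defaults, the for-loop building numbered 'Operational check' steps, the while-loop padding them to three, and the split(':',1)[1].strip() re-parsing of steps[0] with two early-return scans (first truthy value among a key list, first non-blank line of the answer) and assembles the result by direct concatenation instead of join.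
import Mathlib
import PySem

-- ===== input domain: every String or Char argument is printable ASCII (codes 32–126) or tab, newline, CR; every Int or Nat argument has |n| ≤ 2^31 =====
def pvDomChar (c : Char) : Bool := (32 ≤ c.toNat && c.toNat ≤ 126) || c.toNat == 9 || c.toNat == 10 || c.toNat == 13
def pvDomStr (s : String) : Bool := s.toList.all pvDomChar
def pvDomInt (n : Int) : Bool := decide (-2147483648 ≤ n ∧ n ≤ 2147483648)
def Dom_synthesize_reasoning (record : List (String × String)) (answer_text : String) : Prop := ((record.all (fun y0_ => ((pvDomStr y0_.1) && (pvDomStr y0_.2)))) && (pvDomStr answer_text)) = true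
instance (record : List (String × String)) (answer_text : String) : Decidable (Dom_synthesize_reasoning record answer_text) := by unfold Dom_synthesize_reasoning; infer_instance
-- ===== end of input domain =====

-- B replaces A's or-chains, numbered-steps for-loop, while-loop padding and split(':',1)/strip
-- re-parsing of steps[0] by two early-return scans (first truthy key value, first non-blank line)
-- and direct string concatenation (objective: simpler; same return value).

-- ===== PORT A =====
-- shared module helper of the Python file (used verbatim by both A and B)
-- normalize_space(text): " ".join(str(text or "").split()).strip()
def normalize_space (text : Option String) : String :=
  PySem.Str.strip (PySem.Str.join " " (PySem.Str.split₀ (text.getD "")))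

-- Python's 'a or b' on an optional string operand ('' and None are falsy)
def pyOrStr (a b : Option String) : Option String :=
  match a with
  | some s => if s = "" then b else some s
  | none => b

-- coalesce_question(record)
def coalesce_question (record : List (String × String)) : String :=
  normalize_space (pyOrStr ((PySem.Dict.mk record).get? "q")
    (pyOrStr ((PySem.Dict.mk record).get? "question") ((PySem.Dict.mk record).get? "prompt")))

-- the while-loop 'while len(steps) < 3: steps.append(...)' ; it runs at most 3 times, fuel 3 is exact
def padSteps : Nat → List String → List String
  | 0, steps => steps
  | n+1, steps =>
    if steps.length < 3 then
      padSteps n (steps ++ [PySem.Int.toStr ((steps.length : Int) + 1) ++ ". Operational check: verify the governing onboard limits, alarms, and authority chain before continuing."])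
    else steps

def synthesize_reasoning (record : List (String × String)) (answer_text : String) : String :=
  let domain := normalize_space (pyOrStr (pyOrStr ((PySem.Dict.mk record).get? "domain_letter") ((PySem.Dict.mk record).get? "domain_name")) (some "shipboard"))
  let sample_type := normalize_space (pyOrStr (pyOrStr ((PySem.Dict.mk record).get? "sample_type") ((PySem.Dict.mk record).get? "type")) (some "maritime"))
  let q := coalesce_question record
  let answer_lines := ((PySem.Str.splitlines answer_text).filter
      (fun line => normalize_space (some line) ≠ "")).map (fun line => normalize_space (some line))
  let steps := (PySem.List.enumerate (PySem.List.slice answer_lines none (some 3)) 1).foldl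
      (fun acc p => acc ++ [PySem.Int.toStr p.1 ++ ". Operational check: " ++ p.2]) []
  let steps := padSteps 3 steps
  PySem.Str.join "\n"
    [ "1. Context: " ++ sample_type ++ " case in domain " ++ domain ++ "."
    , "2. Question focus: " ++ (if q = "" then "maritime safety decision" else q) ++ "."
    , "3. Safety logic: isolate the immediate risk, confirm the critical inputs, then apply the governing procedure."
    , "4. Evidence: " ++ PySem.Str.strip ((PySem.List.pyGet? ((PySem.Str.splitMax? ((PySem.List.pyGet? steps 0).getD "") ":" 1).getD []) 1).getD "") ]

-- ===== PORT B =====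
def DEFAULT_CHECK : String := "verify the governing onboard limits, alarms, and authority chain before continuing."

-- _first_truthy(record, keys, default): scan the keys, return the normalized first truthy value
def firstTruthy (d : PySem.Dict String String) : List String → String → String
  | [], dflt => normalize_space (some dflt)
  | k :: ks, dflt =>
    match d.get? k with
    | some v => if v = "" then firstTruthy d ks dflt else normalize_space (some v)
    | none => firstTruthy d ks dflt

-- _first_nonblank_line(text): first line whose normalization is non-blank, else the default sentence
def firstGood : List String → String
  | [] => DEFAULT_CHECK
  | line :: rest =>
    let s := normalize_space (some line)
    if s = "" then firstGood rest else s

def synthesize_reasoning_alt (record : List (String × String)) (answer_text : String) : String :=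
  let d := PySem.Dict.mk record
  let domain := firstTruthy d ["domain_letter", "domain_name"] "shipboard"
  let sample_type := firstTruthy d ["sample_type", "type"] "maritime"
  let q := firstTruthy d ["q", "question", "prompt"] ""
  "1. Context: " ++ sample_type ++ " case in domain " ++ domain ++ ".\n" ++
  "2. Question focus: " ++ (if q = "" then "maritime safety decision" else q) ++ ".\n" ++
  "3. Safety logic: isolate the immediate risk, confirm the critical inputs, then apply the governing procedure.\n" ++
  "4. Evidence: " ++ firstGood (PySem.Str.splitlines answer_text)

-- ===== PRECONDITION & SPEC =====
def Spec_synthesize_reasoning (record : List (String × String)) (answer_text : String) (out : String) : Prop := out = synthesize_reasoning_alt record answer_text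
instance (record : List (String × String)) (answer_text : String) (out : String) : Decidable (Spec_synthesize_reasoning record answer_text out) := by unfold Spec_synthesize_reasoning; infer_instance

-- ===== CLAIM (what is proved, stated in full; the proofs are below) =====
def Claim_equal_synthesize_reasoning : Prop := ∀ (record : List (String × String)) (answer_text : String), Dom_synthesize_reasoning record answer_text → Spec_synthesize_reasoning record answer_text (synthesize_reasoning record answer_text)

-- ===== LEMMAS AND PROOFS =====

-- B's key scan computes the normalization of A's two-key or-chain with literal fallback
theorem firstTruthy_two (d : PySem.Dict String String) (k1 k2 dflt : String) :
    firstTruthy d [k1, k2] dflt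
      = normalize_space (pyOrStr (pyOrStr (d.get? k1) (d.get? k2)) (some dflt)) := by
  cases h1 : d.get? k1 <;> cases h2 : d.get? k2 <;>
    simp only [firstTruthy, pyOrStr, h1, h2] <;>
      first
      | (split_ifs <;> simp_all)
      | rfl

-- normalize_space treats none and some "" alike
theorem normalize_none : normalize_space none = normalize_space (some "") := rfl

-- B's three-key scan with default "" computes coalesce_question
theorem firstTruthy_q (record : List (String × String)) :
    firstTruthy (PySem.Dict.mk record) ["q", "question", "prompt"] "" = coalesce_question record := by
  unfold coalesce_question
  cases h1 : (PySem.Dict.mk record).get? "q" <;>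
    cases h2 : (PySem.Dict.mk record).get? "question" <;>
      cases h3 : (PySem.Dict.mk record).get? "prompt" <;>
        simp only [firstTruthy, pyOrStr, h1, h2, h3] <;>
          first
          | (split_ifs <;> simp_all [normalize_none])
          | rfl

-- B's line scan equals the head (or default) of A's filtered-and-normalized line list
theorem firstGood_eq (l : List String) :
    firstGood l = ((l.filter (fun x => normalize_space (some x) ≠ "")).map
      (fun x => normalize_space (some x))).headD DEFAULT_CHECK := by
  induction l with
  | nil => rfl
  | cons a t ih =>
    by_cases h : normalize_space (some a) = ""
    · simpa [firstGood, h] using ih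
    · simp [firstGood, h]

-- '\n'.join of four strings is their direct concatenation
theorem join4 (a b c d : String) :
    PySem.Str.join "\n" [a, b, c, d] = a ++ "\n" ++ b ++ "\n" ++ c ++ "\n" ++ d := by
  apply String.toList_inj.mp
  simp [PySem.Str.toList_join, PySem.Chars.join, String.toList_append, List.intercalate,
    List.intersperse]

-- [':'] is not a prefix of c :: l when c ≠ ':'
theorem colon_not_prefix {c : Char} (l : List Char) (h : c ≠ ':') :
    ([':'] : List Char).isPrefixOf (c :: l) = false := by
  simp [List.isPrefixOf]
  intro hc
  exact absurd hc.symm h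

-- walking splitOnMax.go over a colon-free prefix just moves it into cur
theorem go_walk (pref : List Char) (hp : ∀ c ∈ pref, c ≠ ':') :
    ∀ (fuel : Nat), pref.length < fuel → ∀ (l cur : List Char) (acc2 : List (List Char)),
      PySem.Chars.splitOnMax.go [':'] fuel 1 (pref ++ l) cur acc2 =
      PySem.Chars.splitOnMax.go [':'] (fuel - pref.length) 1 l (pref.reverse ++ cur) acc2 := by
  induction pref with
  | nil => intro fuel h l cur acc2; simp
  | cons c p ih =>
    intro fuel h l cur acc2
    cases fuel with
    | zero => simp at h
    | succ f =>
      have hc : c ≠ ':' := hp c (by simp)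
      rw [List.cons_append, PySem.Chars.splitOnMax.go]
      simp only [colon_not_prefix _ hc]
      have h' : p.length < f := by simp at h; omega
      rw [if_neg (by simp)]
      rw [ih (fun d hd => hp d (by simp [hd])) f h' l (c::cur) acc2]
      simp [Nat.succ_sub_succ]

-- splitOnMax.go with maxsplit exhausted returns the rest as the last piece
theorem go_m0 (fuel : Nat) (l cur : List Char) (acc : List (List Char)) :
    PySem.Chars.splitOnMax.go [':'] fuel 0 l cur acc = ((cur.reverse ++ l) :: acc).reverse := by
  cases fuel <;> cases l <;> rw [PySem.Chars.splitOnMax.go] <;> simp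

-- splitting "1. Operational check: " ++ cs at the first ':' with maxsplit 1
theorem split_evidence (cs : List Char) :
    PySem.Chars.splitOnMax ("1. Operational check: ".toList ++ cs) [':'] 1 =
      ["1. Operational check".toList, ' ' :: cs] := by
  have hlit : "1. Operational check: ".toList = "1. Operational check".toList ++ [':', ' '] := by decide
  have hs : "1. Operational check: ".toList ++ cs = "1. Operational check".toList ++ (':' :: ' ' :: cs) := by
    rw [hlit, List.append_assoc]; rfl
  rw [hs]
  unfold PySem.Chars.splitOnMax
  rw [if_neg (by omega)]
  simp only [Int.toNat_one]
  have hp : ∀ c ∈ "1. Operational check".toList, c ≠ ':' := by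
    have h : "1. Operational check".toList.all (fun c => decide (c ≠ ':')) = true := by decide
    simpa using h
  rw [go_walk _ hp _ (by simp) _ _ _]
  have h2 : ("1. Operational check".toList ++ ':' :: ' ' :: cs).length + 1 - "1. Operational check".toList.length = (cs.length + 2) + 1 := by
    simp
  rw [h2, PySem.Chars.splitOnMax.go]
  simp [List.isPrefixOf, go_m0]

theorem lstrip_idem (l : List Char) : PySem.Chars.lstrip (PySem.Chars.lstrip l) = PySem.Chars.lstrip l := by
  simp [PySem.Chars.lstrip, List.dropWhile_idempotent]

theorem rstrip_idem (l : List Char) : PySem.Chars.rstrip (PySem.Chars.rstrip l) = PySem.Chars.rstrip l := by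
  simp [PySem.Chars.rstrip, List.dropWhile_idempotent]

-- a list with no leading space keeps that after rstrip
theorem lstrip_rstrip (y : List Char) (hy : PySem.Chars.lstrip y = y) :
    PySem.Chars.lstrip (PySem.Chars.rstrip y) = PySem.Chars.rstrip y := by
  cases y with
  | nil => simp [PySem.Chars.lstrip, PySem.Chars.rstrip]
  | cons c t =>
    have hc : PySem.Chars.isspace c = false := by
      by_cases h : PySem.Chars.isspace c = true
      · exfalso
        unfold PySem.Chars.lstrip at hy
        rw [List.dropWhile_cons, if_pos h] at hy
        have := List.length_dropWhile_le (p := PySem.Chars.isspace) t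
        have := congrArg List.length hy
        simp at this
        omega
      · simpa using h
    unfold PySem.Chars.rstrip PySem.Chars.lstrip
    set d := List.dropWhile PySem.Chars.isspace (c :: t).reverse with hd
    have hdsuf : d <:+ (c :: t).reverse := List.dropWhile_suffix _
    have hdne : d ≠ [] := by
      intro h0
      have hall := List.dropWhile_eq_nil_iff.mp (hd ▸ h0)
      have : PySem.Chars.isspace c = true := hall c (by simp)
      simp [hc] at this
    have hlast : d.getLast? = some c := by
      obtain ⟨u, hu⟩ := hdsuf
      have h2 : (u ++ d).getLast? = some c := by rw [hu]; simp [List.getLast?_reverse]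
      rw [List.getLast?_append_of_ne_nil] at h2
      · exact h2
      · exact hdne
    have hhead : d.reverse.head? = some c := by
      rw [List.head?_reverse]; exact hlast
    obtain ⟨rest, hrest⟩ : ∃ rest, d.reverse = c :: rest := by
      cases hdr : d.reverse with
      | nil => rw [hdr] at hhead; simp at hhead
      | cons a b =>
        rw [hdr] at hhead
        simp at hhead
        exact ⟨b, by rw [hhead]⟩
    rw [hrest, List.dropWhile_cons, if_neg (by simp [hc])]

theorem strip_idem (l : List Char) : PySem.Chars.strip (PySem.Chars.strip l) = PySem.Chars.strip l := by
  unfold PySem.Chars.strip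
  rw [lstrip_rstrip _ (lstrip_idem l), rstrip_idem]

theorem strip_space_cons (l : List Char) :
    PySem.Chars.strip (' ' :: l) = PySem.Chars.strip l := by
  unfold PySem.Chars.strip PySem.Chars.lstrip
  simp [PySem.Chars.isspace]

-- padSteps never changes the first element of a non-empty list
theorem padSteps_head (n : Nat) : ∀ (s : String) (t : List String),
    PySem.List.pyGet? (padSteps n (s :: t)) 0 = some s := by
  induction n with
  | zero => intro s t; simp [padSteps, PySem.List.pyGet?, PySem.List.pyIdx?]
  | succ n ih =>
    intro s t
    rw [padSteps]
    split
    · rw [List.cons_append]; exact ih s _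
    · simp [PySem.List.pyGet?, PySem.List.pyIdx?]

-- A's evidence expression returns the first answer line unchanged (it is already stripped)
theorem evidence_cons (w l0 : String) (hw : l0 = PySem.Str.strip w) (t : List String) :
    PySem.Str.strip ((PySem.List.pyGet? ((PySem.Str.splitMax?
      ((PySem.List.pyGet? (padSteps 3 (("1" ++ ". Operational check: " ++ l0) :: t)) 0).getD "") ":" 1).getD []) 1).getD "") = l0 := by
  rw [padSteps_head]
  simp only [Option.getD_some]
  have htl : ("1" ++ ". Operational check: " ++ l0).toList = "1. Operational check: ".toList ++ l0.toList := by
    simp [String.toList_append]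
  unfold PySem.Str.splitMax?
  rw [htl]
  unfold PySem.Chars.splitMax?
  rw [if_neg (by decide)]
  rw [show ":".toList = ([':'] : List Char) from by decide]
  rw [split_evidence]
  simp only [Option.getD_some, Option.map_some, List.map_cons, List.map_nil]
  have hget : PySem.List.pyGet? [String.ofList "1. Operational check".toList, String.ofList (' ' :: l0.toList)] 1
      = some (String.ofList (' ' :: l0.toList)) := by
    simp [PySem.List.pyGet?, PySem.List.pyIdx?]
  rw [hget]
  simp only [Option.getD_some]
  apply String.toList_inj.mp
  rw [PySem.Str.toList_strip, String.toList_ofList, strip_space_cons, hw,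
    PySem.Str.toList_strip, strip_idem]

-- the empty-answer case is a closed computation
set_option maxRecDepth 4096 in
theorem evidence_nil :
    PySem.Str.strip ((PySem.List.pyGet? ((PySem.Str.splitMax?
      ((PySem.List.pyGet? (padSteps 3 ([] : List String)) 0).getD "") ":" 1).getD []) 1).getD "") = DEFAULT_CHECK := by
  decide

-- ===== VERDICT (by name: the statement is the Claim_ definition above) =====
set_option maxRecDepth 16384 in
theorem synthesize_reasoning_spec : Claim_equal_synthesize_reasoning := by
  intro record answer_text _
  unfold Spec_synthesize_reasoning synthesize_reasoning synthesize_reasoning_alt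
  dsimp only
  rw [join4, firstTruthy_two, firstTruthy_two, firstTruthy_q,
    firstGood_eq (PySem.Str.splitlines answer_text)]
  rcases hals : ((PySem.Str.splitlines answer_text).filter
      (fun line => normalize_space (some line) ≠ "")).map (fun line => normalize_space (some line)) with _ | ⟨l0, rest⟩
  · rw [show PySem.List.slice ([] : List String) none (some 3) = [] from by
      rw [PySem.List.slice_to ([] : List String) (b := 3) (by omega)]; simp]
    dsimp only [PySem.List.enumerate, List.foldl]
    rw [evidence_nil]
    simp only [List.headD_nil, show (".\n" : String) = "." ++ "\n" from rfl,
      show ("3. Safety logic: isolate the immediate risk, confirm the critical inputs, then apply the governing procedure.\n" : String) = "3. Safety logic: isolate the immediate risk, confirm the critical inputs, then apply the governing procedure." ++ "\n" from rfl,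
      String.append_assoc]
  · obtain ⟨line, rest', -, hline, -⟩ := List.map_eq_cons_iff.mp hals
    have hw : l0 = PySem.Str.strip (PySem.Str.join " " (PySem.Str.split₀ ((some line).getD ""))) := by
      rw [← hline]; rfl
    rw [show PySem.List.slice (l0 :: rest) none (some 3) = l0 :: List.take 2 rest from by
      rw [PySem.List.slice_to (l0 :: rest) (b := 3) (by omega)]
      rw [show Int.toNat 3 = 3 from rfl, List.take_succ_cons]]
    rw [show PySem.List.enumerate (l0 :: List.take 2 rest) 1 = (1, l0) :: PySem.List.enumerate (List.take 2 rest) 2 from rfl]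
    rw [PySem.List.foldl_append_singleton_eq_map (f := fun p : Int × String => PySem.Int.toStr p.1 ++ ". Operational check: " ++ p.2)]
    rw [List.nil_append, List.map_cons]
    rw [show PySem.Int.toStr (1 : Int) = "1" from rfl]
    rw [evidence_cons _ _ hw]
    simp only [List.headD_cons, show (".\n" : String) = "." ++ "\n" from rfl,
      show ("3. Safety logic: isolate the immediate risk, confirm the critical inputs, then apply the governing procedure.\n" : String) = "3. Safety logic: isolate the immediate risk, confirm the critical inputs, then apply the governing procedure." ++ "\n" from rfl,
      String.append_assoc]
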